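-- pv_equiv track=rewrite | github.com/mcmespana/mcmapp-cantoral | scripts/tab2chordpro.py | ajusta_posiciones
-- ===== SOURCE A (Python) =====
-- from typing import List, Tuple
-- from typing import List, Tuple, Dict
--
-- def ajusta_posiciones(pos:List[Tuple[int,str]],lyrics:str)->List[Tuple[int,str]]:
--     ajust,used=[],set(); L=len(lyrics)
--     for col,tok in pos:
--         p=col
--         while p<L and lyrics[p].isspace(): p+=1
--         if p>L: p=L
--         while p in used and p<L: p+=1
--         used.add(p); ajust.append((p,tok))
--     return sorted(ajust,key=lambda x:x[0])
-- ===== SOURCE B (Python) =====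
-- from typing import List, Tuple
--
-- def ajusta_posiciones(pos: List[Tuple[int, str]], lyrics: str) -> List[Tuple[int, str]]:
--     L = len(lyrics)
--     succ = {}  # occupied slot -> next candidate slot (path-compressed free-slot finder)
--
--     def claim(p):
--         path = []
--         while p < L and p in succ:
--             path.append(p)
--             p = succ[p]
--         for q in path:
--             succ[q] = p
--         return p
--
--     placed = []
--     for col, tok in pos:
--         p = next((i for i in range(min(col, L), L) if not lyrics[i].isspace()), L)
--         p = claim(p)
--         succ[p] = p + 1
--         placed.append((p, tok))
--     return sorted(placed, key=lambda x: x[0])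
-- ===== Notes on version B (the rewrite author's own statement) =====
-- stated objective: alternative
-- what changed: A probes for a free column by stepping an index through a plain used-set and finds non-whitespace by a scan-and-clamp loop; B keeps a path-compressed next-free-slot dictionary (union-find style) so repeated collisions jump in amortised near-constant steps, and locates each token's first non-whitespace column as a single first-match search over the index range; Pre_ excludes only inputs where both raise IndexError (a column below -len(lyrics)).
import Mathlib
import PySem

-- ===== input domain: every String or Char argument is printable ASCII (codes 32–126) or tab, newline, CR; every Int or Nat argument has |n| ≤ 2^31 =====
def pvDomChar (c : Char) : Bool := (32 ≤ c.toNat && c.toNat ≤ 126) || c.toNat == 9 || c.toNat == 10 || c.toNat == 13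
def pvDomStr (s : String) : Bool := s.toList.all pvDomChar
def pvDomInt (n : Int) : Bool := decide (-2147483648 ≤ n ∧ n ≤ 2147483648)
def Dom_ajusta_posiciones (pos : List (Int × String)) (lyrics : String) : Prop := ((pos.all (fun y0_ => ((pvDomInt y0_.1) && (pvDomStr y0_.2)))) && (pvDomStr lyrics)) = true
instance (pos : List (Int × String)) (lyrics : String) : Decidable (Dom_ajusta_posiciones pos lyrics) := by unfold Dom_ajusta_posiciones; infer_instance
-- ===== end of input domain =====

-- B replaces A's linear probing over a plain used-set by a path-compressed "next free slot"
-- dictionary (union-find style), and finds each token's first non-whitespace column with a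
-- single first-match search over the index range instead of A's scan-and-clamp.

-- ===== PORT A =====

-- while p < L and lyrics[p].isspace(): p += 1
-- (pyGet? = none is Python's IndexError on lyrics[p]; those inputs are excluded by Pre_)
def skipA (cs : List Char) (p : Int) : Int :=
  if _h : p < (cs.length : Int) ∧ ((PySem.List.pyGet? cs p).map PySem.Chars.isspace).getD false = true
  then skipA cs (p + 1) else p
termination_by ((cs.length : Int) - p).toNat
decreasing_by omega

-- while p in used and p < L: p += 1
def probeA (used : PySem.Set Int) (L p : Int) : Int :=
  if _h : p ∈ used ∧ p < L then probeA used L (p + 1) else p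
termination_by (L - p).toNat
decreasing_by omega

def loopA (cs : List Char) (used : PySem.Set Int) (ajust : List (Int × String)) :
    List (Int × String) → List (Int × String)
  | [] => ajust
  | (col, tok) :: rest =>
    let L : Int := cs.length
    let p0 := skipA cs col
    let p1 := if p0 > L then L else p0
    let p := probeA used L p1
    loopA cs (PySem.Set.add used p) (ajust ++ [(p, tok)]) rest

def ajusta_posiciones (pos : List (Int × String)) (lyrics : String) : List (Int × String) :=
  PySem.List.sorted (loopA lyrics.toList PySem.Set.empty [] pos) (fun x => x.1) false

-- ===== PORT B =====

-- not lyrics[i].isspace()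
def predB (cs : List Char) (i : Int) : Bool :=
  !(((PySem.List.pyGet? cs i).map PySem.Chars.isspace).getD false)

-- claim's walk: follow succ pointers while p < L and p is occupied, recording the path.
-- (the fuel only makes the recursion total; (L - p).toNat always suffices for the dicts B builds)
def claimWalk (d : PySem.Dict Int Int) (L : Int) : Nat → Int → List Int → Int × List Int
  | 0, p, path => (p, path)
  | Nat.succ fuel, p, path =>
    if p < L then
      match PySem.Dict.get? d p with
      | some q => claimWalk d L fuel q (path ++ [p])
      | none => (p, path)
    else (p, path)

def loopB (cs : List Char) (d : PySem.Dict Int Int) : List (Int × String) → List (Int × String)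
  | [] => []
  | (col, tok) :: rest =>
    let L : Int := cs.length
    -- p = next((i for i in range(min(col, L), L) if not lyrics[i].isspace()), L)
    let p0 := ((PySem.List.pyRange (min col L) L 1).find? (predB cs)).getD L
    -- p = claim(p): walk, then compress the recorded path onto the result
    let r := claimWalk d L (L - p0).toNat p0 []
    let d1 := r.2.foldl (fun dd q => PySem.Dict.insert dd q r.1) d
    -- succ[p] = p + 1
    let d2 := PySem.Dict.insert d1 r.1 (r.1 + 1)
    (r.1, tok) :: loopB cs d2 rest

def ajusta_posiciones_alt (pos : List (Int × String)) (lyrics : String) : List (Int × String) :=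
  PySem.List.sorted (loopB lyrics.toList PySem.Dict.empty pos) (fun x => x.1) false

-- ===== PRECONDITION & SPEC =====
-- Pre_ excludes exactly the inputs where A raises IndexError: a column below -len(lyrics)
-- makes A's indexing lyrics[p] fall off the string (B raises there too).
def Pre_ajusta_posiciones (pos : List (Int × String)) (lyrics : String) : Prop :=
  ∀ pr ∈ pos, -(PySem.Str.len lyrics) ≤ pr.1
instance (pos : List (Int × String)) (lyrics : String) : Decidable (Pre_ajusta_posiciones pos lyrics) := by unfold Pre_ajusta_posiciones; infer_instance

def pvWitness_ajusta_posiciones : (List (Int × String)) × String := ([(0, "C"), (-2, "G"), (5, "D")], "ho la")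

def Spec_ajusta_posiciones (pos : List (Int × String)) (lyrics : String) (out : List (Int × String)) : Prop := out = ajusta_posiciones_alt pos lyrics
instance (pos : List (Int × String)) (lyrics : String) (out : List (Int × String)) : Decidable (Spec_ajusta_posiciones pos lyrics out) := by unfold Spec_ajusta_posiciones; infer_instance

-- ===== CLAIM (what is proved, stated in full; the proofs are below) =====
def Claim_equal_ajusta_posiciones : Prop := ∀ (pos : List (Int × String)) (lyrics : String), Dom_ajusta_posiciones pos lyrics → Pre_ajusta_posiciones pos lyrics → Spec_ajusta_posiciones pos lyrics (ajusta_posiciones pos lyrics)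

-- ===== LEMMAS AND PROOFS =====

-- the invariant of B's free-slot dictionary: every pointer goes strictly up, and a pointer
-- from an in-bounds slot stays ≤ L and jumps only over occupied slots
def InvD (L : Int) (d : PySem.Dict Int Int) : Prop :=
  ∀ q r, d.get? q = some r → q < r ∧ (q < L →
    r ≤ L ∧ ∀ s, q ≤ s → s < r → (d.get? s).isSome = true)

theorem pyGet?_isSome_of (cs : List Char) (p : Int)
    (h1 : -(cs.length : Int) ≤ p) (h2 : p < (cs.length : Int)) :
    (PySem.List.pyGet? cs p).isSome = true := by
  simp only [PySem.List.pyGet?, PySem.List.pyIdx?]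
  split_ifs <;> simp_all
  omega

theorem skip_aux (cs : List Char) : ∀ (n : Nat) (p : Int), ((cs.length : Int) - p).toNat = n →
    -(cs.length : Int) ≤ p → p ≤ (cs.length : Int) →
    skipA cs p ≤ (cs.length : Int) ∧
    ((PySem.List.pyRange p (cs.length : Int) 1).find? (predB cs)).getD (cs.length : Int) = skipA cs p := by
  intro n
  induction n with
  | zero =>
    intro p hn h1 h2
    have hp : p = (cs.length : Int) := by omega
    subst hp
    rw [skipA, dif_neg (by omega), PySem.List.pyRange_one_eq_nil le_rfl]
    simp
  | succ m ih =>
    intro p hn h1 h2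
    have hpL : p < (cs.length : Int) := by omega
    obtain ⟨c, hc⟩ := Option.isSome_iff_exists.mp (pyGet?_isSome_of cs p h1 hpL)
    rw [PySem.List.pyRange_one_cons hpL, List.find?_cons]
    by_cases hs : PySem.Chars.isspace c
    · rw [show predB cs p = false by simp [predB, hc, hs]]
      rw [skipA, dif_pos ⟨hpL, by simp [hc, hs]⟩]
      exact ih (p + 1) (by omega) (by omega) (by omega)
    · rw [show predB cs p = true by simp [predB, hc, hs]]
      rw [skipA, dif_neg (by simp [hc, hs])]
      exact ⟨by omega, rfl⟩

-- A's whitespace scan followed by the p > L clamp = B's first-match over the index range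
theorem skip_eq (cs : List Char) (col : Int) (hcol : -(cs.length : Int) ≤ col) :
    ((PySem.List.pyRange (min col (cs.length : Int)) (cs.length : Int) 1).find? (predB cs)).getD (cs.length : Int)
      = (if skipA cs col > (cs.length : Int) then (cs.length : Int) else skipA cs col) := by
  rcases le_or_gt col (cs.length : Int) with h | h
  · rw [min_eq_left h]
    obtain ⟨hle, heq⟩ := skip_aux cs _ col rfl hcol h
    rw [heq, if_neg (by omega)]
  · rw [min_eq_right (by omega), PySem.List.pyRange_one_eq_nil le_rfl,
        skipA, dif_neg (by omega), if_pos h]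
    simp

theorem probeA_congr (used : PySem.Set Int) (L : Int) : ∀ (n : Nat) (a b : Int), (b - a).toNat = n → a ≤ b → b ≤ L →
    (∀ s, a ≤ s → s < b → s ∈ used) → probeA used L a = probeA used L b := by
  intro n
  induction n with
  | zero => intro a b hn h1 _ _; have : a = b := by omega
            rw [this]
  | succ m ih =>
    intro a b hn h1 h2 hmem
    have haL : a < L := by omega
    rw [probeA, dif_pos ⟨hmem a le_rfl (by omega), haL⟩]
    exact ih (a + 1) b (by omega) (by omega) h2 (fun s hs1 hs2 => hmem s (by omega) hs2)

-- the probe never lands on a used slot below L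
theorem probeA_not (used : PySem.Set Int) (L p : Int) :
    ¬ ((probeA used L p) ∈ used ∧ probeA used L p < L) := by
  rw [probeA]
  split
  next _ => exact probeA_not used L (p + 1)
  next h => simpa using h
termination_by (L - p).toNat
decreasing_by omega

-- the walk computes exactly A's linear probe, stays ≤ L, crosses only occupied slots,
-- and records a path of in-bounds slots below the result
theorem walk_spec (d : PySem.Dict Int Int) (L : Int) (used : PySem.Set Int)
    (hinv : InvD L d) (hmem : ∀ x : Int, x ∈ used ↔ (d.get? x).isSome = true) :
    ∀ (fuel : Nat) (p : Int) (path : List Int), p ≤ L → (L - p).toNat ≤ fuel →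
    (claimWalk d L fuel p path).1 = probeA used L p
    ∧ p ≤ (claimWalk d L fuel p path).1 ∧ (claimWalk d L fuel p path).1 ≤ L
    ∧ (∀ s, p ≤ s → s < (claimWalk d L fuel p path).1 → (d.get? s).isSome = true)
    ∧ (∀ q ∈ (claimWalk d L fuel p path).2, q ∈ path ∨
        (p ≤ q ∧ q < (claimWalk d L fuel p path).1 ∧ q < L)) := by
  intro fuel
  induction fuel with
  | zero =>
    intro p path hpL hfuel
    have hp : p = L := by omega
    subst hp
    simp only [claimWalk]
    refine ⟨?_, le_rfl, le_rfl, by omega, fun q hq => Or.inl hq⟩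
    rw [probeA, dif_neg (by omega)]
  | succ m ih =>
    intro p path hpL hfuel
    rcases lt_or_ge p L with hpl | hpl
    · cases hget : PySem.Dict.get? d p with
      | none =>
        simp only [claimWalk, if_pos hpl, hget]
        have hnp : ¬ (p ∈ used) := by rw [hmem, hget]; simp
        refine ⟨?_, le_rfl, hpL, by omega, fun q hq => Or.inl hq⟩
        rw [probeA, dif_neg (by tauto)]
      | some q =>
        obtain ⟨hpq, hrest⟩ := hinv p q hget
        obtain ⟨hqL, hint⟩ := hrest hpl
        obtain ⟨ha, hb1, hb2, hc, hd⟩ := ih q (path ++ [p]) hqL (by omega)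
        have hstep : (claimWalk d L (m+1) p path) = claimWalk d L m q (path ++ [p]) := by
          simp only [claimWalk, if_pos hpl, hget]
        rw [hstep]
        refine ⟨?_, by omega, hb2, ?_, ?_⟩
        · have hpq' : probeA used L p = probeA used L q := by
            rw [probeA, dif_pos ⟨(hmem p).mpr (by simp [hget]), hpl⟩]
            exact probeA_congr used L _ (p+1) q rfl (by omega) hqL
              (fun s hs1 hs2 => (hmem s).mpr (hint s (by omega) hs2))
          rw [ha, hpq']
        · intro s hs1 hs2
          rcases lt_or_ge s q with h | h
          · exact hint s hs1 h
          · exact hc s h hs2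
        · intro x hx
          rcases hd x hx with hx' | hx'
          · rcases List.mem_append.mp hx' with h | h
            · exact Or.inl h
            · simp at h
              subst h
              exact Or.inr ⟨le_rfl, by omega, hpl⟩
          · exact Or.inr ⟨by omega, hx'.2.1, hx'.2.2⟩
    · have hp : p = L := by omega
      subst hp
      have hred : claimWalk d p (Nat.succ m) p path = (p, path) := by
        simp only [claimWalk, if_neg (lt_irrefl p)]
      rw [hred]
      refine ⟨?_, le_rfl, le_rfl, by omega, fun q hq => Or.inl hq⟩
      rw [probeA, dif_neg (by omega)]

theorem foldl_insert_const (v : Int) : ∀ (l : List Int) (d : PySem.Dict Int Int) (x : Int),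
    (l.foldl (fun dd q => PySem.Dict.insert dd q v) d).get? x
      = if x ∈ l then some v else d.get? x := by
  intro l
  induction l with
  | nil => intro d x; simp
  | cons q l ih =>
    intro d x
    simp only [List.foldl_cons, ih, List.mem_cons]
    rw [PySem.Dict.get?_insert]
    by_cases h1 : x ∈ l
    · simp [h1]
    · by_cases h2 : x = q <;> simp [h1, h2]

theorem loop_eq (cs : List Char) : ∀ (pos : List (Int × String)) (used : PySem.Set Int)
    (d : PySem.Dict Int Int) (ajust : List (Int × String)),
    (∀ x : Int, x ∈ used ↔ (d.get? x).isSome = true) → InvD (cs.length : Int) d →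
    (∀ pr ∈ pos, -(cs.length : Int) ≤ pr.1) →
    loopA cs used ajust pos = ajust ++ loopB cs d pos := by
  intro pos
  induction pos with
  | nil => intro used d ajust _ _ _; simp [loopA, loopB]
  | cons hd rest ih =>
    intro used d ajust hmem hinv hpre
    obtain ⟨col, tok⟩ := hd
    have hcol : -(cs.length : Int) ≤ col := hpre (col, tok) (by simp)
    have hskip := skip_eq cs col hcol
    set L : Int := (cs.length : Int) with hL
    set p1 : Int := if skipA cs col > L then L else skipA cs col with hp1
    have hp1L : p1 ≤ L := by rw [hp1]; split_ifs with h <;> omega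
    set r := claimWalk d L (L - p1).toNat p1 [] with hr
    obtain ⟨hwa, hwb1, hwb2, hwc, hwd⟩ :=
      walk_spec d L used hinv hmem (L - p1).toNat p1 [] hp1L le_rfl
    have hpath : ∀ q ∈ r.2, p1 ≤ q ∧ q < r.1 ∧ q < L := by
      intro q hq
      rcases hwd q hq with h | h
      · simp at h
      · exact h
    set d1 := r.2.foldl (fun dd q => PySem.Dict.insert dd q r.1) d with hd1
    set d2 := PySem.Dict.insert d1 r.1 (r.1 + 1) with hd2def
    have hd2 : ∀ x, d2.get? x =
        if x = r.1 then some (r.1 + 1) else if x ∈ r.2 then some r.1 else d.get? x := by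
      intro x
      rw [hd2def, PySem.Dict.get?_insert, hd1, foldl_insert_const]
    have hmono : ∀ s, (d.get? s).isSome = true → (d2.get? s).isSome = true := by
      intro s hs
      rw [hd2]
      split_ifs <;> simp_all
    have hmem2 : ∀ x : Int, x ∈ PySem.Set.add used r.1 ↔ (d2.get? x).isSome = true := by
      intro x
      rw [PySem.Set.mem_add, hd2]
      by_cases hx : x = r.1
      · simp [hx]
      · rw [if_neg hx]
        by_cases hx2 : x ∈ r.2
        · obtain ⟨h1, h2, h3⟩ := hpath x hx2
          simp [hx2, hx, (hmem x).mpr (hwc x h1 h2)]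
        · simp [hx2, hx, hmem x]
    have hinv2 : InvD L d2 := by
      intro q v hq
      rw [hd2] at hq
      by_cases hq1 : q = r.1
      · rw [if_pos hq1] at hq
        obtain rfl : v = r.1 + 1 := (Option.some.inj hq).symm
        subst hq1
        refine ⟨by omega, fun hqL => ⟨by omega, ?_⟩⟩
        intro s hs1 hs2
        have hs : s = r.1 := by omega
        rw [hd2, if_pos hs]
        simp
      · rw [if_neg hq1] at hq
        by_cases hq2 : q ∈ r.2
        · rw [if_pos hq2] at hq
          obtain rfl : v = r.1 := (Option.some.inj hq).symm
          obtain ⟨h1, h2, h3⟩ := hpath q hq2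
          refine ⟨by omega, fun _ => ⟨by omega, ?_⟩⟩
          intro s hs1 hs2
          exact hmono s (hwc s (by omega) (by omega))
        · rw [if_neg hq2] at hq
          obtain ⟨h1, h2⟩ := hinv q v hq
          refine ⟨h1, fun hqL => ⟨(h2 hqL).1, ?_⟩⟩
          intro s hs1 hs2
          exact hmono s ((h2 hqL).2 s hs1 hs2)
    have hrec := ih (PySem.Set.add used r.1) d2 (ajust ++ [(r.1, tok)]) hmem2 hinv2
      (fun pr hpr => hpre pr (by simp [hpr]))
    simp only [loopA, loopB]
    rw [← hL, hskip, ← hp1, ← hr, ← hd1, ← hd2def, ← hwa, hrec]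
    simp

-- ===== VERDICT (by name: the statement is the Claim_ definition above) =====
theorem ajusta_posiciones_spec : Claim_equal_ajusta_posiciones := by
  intro pos lyrics _hdom hpre
  unfold Spec_ajusta_posiciones ajusta_posiciones ajusta_posiciones_alt
  have hpre' : ∀ pr ∈ pos, -(lyrics.toList.length : Int) ≤ pr.1 := by
    intro pr hpr
    have := hpre pr hpr
    rwa [PySem.Str.len_eq] at this
  rw [loop_eq lyrics.toList pos PySem.Set.empty PySem.Dict.empty []
      (by intro x; simp [PySem.Set.empty, PySem.Dict.get?_empty])
      (by intro q r h; simp [PySem.Dict.get?_empty] at h) hpre']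
  rfl
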